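-- pv_equiv track=rewrite | github.com/willjrowe/algorithmDesign | minimizeLateness.py | calculateLateness
-- ===== SOURCE A (Python) =====
-- def calculateLateness(schedule):
--     #calculates the lateness of some schedule of jobs
--     currTime = 0 #default start time to time zero
--     maxLateness = 0
--     for i in range(0,len(schedule)):
--         currTime += schedule[i][1]
--         if currTime > schedule[i][0]:
--             maxLateness = max(currTime - schedule[i][0],maxLateness)
--     return maxLateness
-- ===== SOURCE B (Python) =====
-- def calculateLateness(schedule):
--     # Back-to-front scan with a shift-invariant accumulator: `worst` is the
--     # worst (unfloored) lateness of the suffix processed so far, as if that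
--     # suffix started at time 0 (None for the empty suffix). Prepending a job
--     # shifts the whole suffix by the job's duration. Floor at 0 once at the end.
--     worst = None
--     for due, duration in reversed(schedule):
--         own = duration - due
--         worst = own if worst is None else max(own, duration + worst)
--     return 0 if worst is None else max(0, worst)
-- ===== Notes on version B (the rewrite author's own statement) =====
-- stated objective: alternative
-- what changed: Replaces the forward clock-accumulating scan with a back-to-front scan that keeps no running time: it maintains the worst unfloored lateness of the suffix as if started at time 0, shifting it by each prepended job's duration, and floors at 0 once at the end.
import Mathlib
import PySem

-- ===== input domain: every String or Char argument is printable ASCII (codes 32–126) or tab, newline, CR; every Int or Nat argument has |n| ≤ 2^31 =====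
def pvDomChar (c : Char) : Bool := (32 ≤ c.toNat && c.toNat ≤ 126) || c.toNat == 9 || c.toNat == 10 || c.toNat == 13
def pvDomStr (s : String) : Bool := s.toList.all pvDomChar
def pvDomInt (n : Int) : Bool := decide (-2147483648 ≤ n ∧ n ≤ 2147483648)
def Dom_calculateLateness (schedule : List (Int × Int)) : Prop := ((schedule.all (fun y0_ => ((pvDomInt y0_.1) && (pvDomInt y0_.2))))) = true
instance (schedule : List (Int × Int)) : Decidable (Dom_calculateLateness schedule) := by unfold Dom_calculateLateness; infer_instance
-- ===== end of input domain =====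

-- B replaces A's forward clock-accumulating scan with a back-to-front scan keeping a shift-invariant suffix-worst accumulator, flooring at 0 once at the end.


-- ===== PORT A =====
-- for i in range(len(schedule)): accumulate (currTime, maxLateness) over the jobs in order
def calculateLateness (schedule : List (Int × Int)) : Int :=
  (schedule.foldl (fun (st : Int × Int) job =>
      let currTime := st.1 + job.2
      let maxLateness := if currTime > job.1 then max (currTime - job.1) st.2 else st.2
      (currTime, maxLateness)) (0, 0)).2

-- ===== PORT B =====
-- Source B: loop over reversed(schedule) maintaining the Optional suffix-worst accumulator
def calculateLateness_alt (schedule : List (Int × Int)) : Int :=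
  let worst := schedule.reverse.foldl (fun (worst : Option Int) job =>
      let own := job.2 - job.1
      some (match worst with
            | none => own
            | some w => max own (job.2 + w))) none
  match worst with
  | none => 0
  | some w => max 0 w

-- ===== PRECONDITION & SPEC =====
def Spec_calculateLateness (schedule : List (Int × Int)) (out : Int) : Prop := out = calculateLateness_alt schedule
instance (schedule : List (Int × Int)) (out : Int) : Decidable (Spec_calculateLateness schedule out) := by unfold Spec_calculateLateness; infer_instance

-- ===== CLAIM (what is proved, stated in full; the proofs are below) =====
def Claim_equal_calculateLateness : Prop := ∀ (schedule : List (Int × Int)), Dom_calculateLateness schedule → Spec_calculateLateness schedule (calculateLateness schedule)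

-- ===== LEMMAS AND PROOFS =====
-- proof-side name for B's suffix-worst accumulator (the foldr view of Source B's reversed loop)
def sufW : List (Int × Int) → Option Int
  | [] => none
  | job :: rest =>
      some (match sufW rest with
            | none => job.2 - job.1
            | some w => max (job.2 - job.1) (job.2 + w))

theorem foldr_eq_sufW (s : List (Int × Int)) :
    s.foldr (fun job (worst : Option Int) =>
        let own := job.2 - job.1
        some (match worst with
              | none => own
              | some w => max own (job.2 + w))) none = sufW s := by
  induction s with
  | nil => rfl
  | cons job rest ih => simp only [List.foldr, ih, sufW]

-- A's loop started at clock t with floor m equals "m maxed with t + (B's suffix-worst of s)".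
theorem lateness_loop_eq (s : List (Int × Int)) : ∀ (t m : Int), 0 ≤ m →
    (s.foldl (fun (st : Int × Int) job =>
      let currTime := st.1 + job.2
      let maxLateness := if currTime > job.1 then max (currTime - job.1) st.2 else st.2
      (currTime, maxLateness)) (t, m)).2
    = (match sufW s with
       | none => m
       | some w => max m (t + w)) := by
  induction s with
  | nil => intro t m _; simp [sufW]
  | cons job rest ih =>
    intro t m hm
    simp only [List.foldl]
    rw [ih (t + job.2) (if t + job.2 > job.1 then max (t + job.2 - job.1) m else m)
        (by split_ifs <;> first | exact le_trans hm (le_max_right _ _) | exact hm)]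
    cases h : sufW rest with
    | none => simp only [sufW, h, Int.max_def]; split_ifs <;> linarith
    | some w => simp only [sufW, h, Int.max_def]; split_ifs <;> linarith

-- ===== VERDICT (by name: the statement is the Claim_ definition above) =====
theorem calculateLateness_spec : Claim_equal_calculateLateness := by
  intro s _
  unfold Spec_calculateLateness calculateLateness calculateLateness_alt
  rw [List.foldl_reverse]
  have hb : (s.foldr (fun job (worst : Option Int) =>
        (fun (worst : Option Int) job =>
          let own := job.2 - job.1
          some (match worst with
                | none => own
                | some w => max own (job.2 + w))) worst job) none) = sufW s := foldr_eq_sufW s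
  rw [hb, lateness_loop_eq s 0 0 le_rfl]
  cases h : sufW s with
  | none => simp
  | some w => simp
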